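-- pv_equiv track=rewrite | github.com/digitalcharmco-boop/loveguard-app | execution/crisis_detector.py | _calculate_crisis_level
-- ===== SOURCE A (Python) =====
-- from typing import Dict, List, Tuple
--
-- def _calculate_crisis_level(
--
--     crisis_matches: Dict[str, List[str]],
--     analysis_result: Dict = None
-- ) -> str:
--     """Calculate overall crisis level based on matches and AI analysis"""
--
--     # Check for immediate crisis indicators
--     if 'immediate' in crisis_matches:
--         return 'immediate'
--
--     # Check AI analysis risk score if available
--     if analysis_result and 'risk_score' in analysis_result:
--         risk_score = analysis_result['risk_score']
--         if risk_score >= 90: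
--             return 'immediate'
--         elif risk_score >= 75:
--             return 'high'
--
--     # Check for high-risk categories
--     high_risk_categories = ['violence', 'physical_abuse']
--     for category in high_risk_categories:
--         if category in crisis_matches:
--             return 'high'
--
--     # Check for moderate-risk indicators
--     moderate_risk_categories = ['stalking', 'control']
--     for category in moderate_risk_categories:
--         if category in crisis_matches:
--             return 'moderate'
--
--     # Check AI analysis for moderate risk
--     if analysis_result and 'risk_score' in analysis_result:
--         risk_score = analysis_result['risk_score']
--         if risk_score >= 40:
--             return 'moderate'
--
--     return 'low'
-- ===== SOURCE B (Python) =====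
-- def _calculate_crisis_level(crisis_matches, analysis_result=None):
--     levels = ['low', 'moderate', 'high', 'immediate']
--     has_risk = bool(analysis_result) and 'risk_score' in analysis_result
--     risk = analysis_result['risk_score'] if has_risk else None
--     rank = max(
--         3 if 'immediate' in crisis_matches else 0,
--         3 if has_risk and risk >= 90 else 0,
--         2 if has_risk and risk >= 75 else 0,
--         2 if any(c in crisis_matches for c in ('violence', 'physical_abuse')) else 0,
--         1 if any(c in crisis_matches for c in ('stalking', 'control')) else 0,
--         1 if has_risk and risk >= 40 else 0,
--     )
--     return levels[rank]
-- ===== Notes on version B (the rewrite author's own statement) =====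
-- stated objective: alternative
-- what changed: Replaced A's ordered early-return if/for chain by a collect-and-reduce: each predicate yields a severity rank (immediate=3..low=0), the maximum rank is taken and indexed into a level table.
import Mathlib
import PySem

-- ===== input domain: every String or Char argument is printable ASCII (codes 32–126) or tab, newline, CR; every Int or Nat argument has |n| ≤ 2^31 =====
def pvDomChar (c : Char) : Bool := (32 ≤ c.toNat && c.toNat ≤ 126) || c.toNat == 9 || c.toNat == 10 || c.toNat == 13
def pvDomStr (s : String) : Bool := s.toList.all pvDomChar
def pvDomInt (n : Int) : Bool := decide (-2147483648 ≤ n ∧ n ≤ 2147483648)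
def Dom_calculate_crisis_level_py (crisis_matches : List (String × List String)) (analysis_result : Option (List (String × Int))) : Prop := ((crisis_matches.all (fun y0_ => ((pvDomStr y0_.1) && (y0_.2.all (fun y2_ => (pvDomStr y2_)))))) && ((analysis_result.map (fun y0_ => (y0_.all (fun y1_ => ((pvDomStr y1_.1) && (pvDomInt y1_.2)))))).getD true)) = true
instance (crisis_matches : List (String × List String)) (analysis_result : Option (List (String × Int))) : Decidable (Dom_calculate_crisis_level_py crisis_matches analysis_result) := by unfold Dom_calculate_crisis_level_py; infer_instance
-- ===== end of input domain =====

-- B replaces A's ordered early-return chain by a collect-and-reduce over severity ranks (alternative decomposition, same cost).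

-- ===== PORT A =====
-- literal transliteration of A's if/return chain; dict membership = first-match key
-- lookup on the association list
def calculate_crisis_level_py (crisis_matches : List (String × List String)) (analysis_result : Option (List (String × Int))) : String :=
  if crisis_matches.any (fun p => p.1 == "immediate") then "immediate"
  else
    -- first 'if analysis_result and risk_score in analysis_result' block (early returns as Option)
    let riskBranch : Option String :=
      match analysis_result with
      | some l =>
        if !l.isEmpty then
          match l.find? (fun p => p.1 == "risk_score") with
          | some p =>
            if p.2 ≥ 90 then some "immediate"
            else if p.2 ≥ 75 then some "high"
            else none
          | none => none
        else none
      | none => none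
    match riskBranch with
    | some r => r
    | none =>
      if ["violence", "physical_abuse"].any (fun c => crisis_matches.any (fun p => p.1 == c)) then "high"
      else if ["stalking", "control"].any (fun c => crisis_matches.any (fun p => p.1 == c)) then "moderate"
      else
        match analysis_result with
        | some l =>
          if !l.isEmpty then
            match l.find? (fun p => p.1 == "risk_score") with
            | some p => if p.2 ≥ 40 then "moderate" else "low"
            | none => "low"
          else "low"
        | none => "low"

-- ===== PORT B =====
-- transliteration of Source B: evaluate all predicates, fold max over their severity ranks,
-- index into the level table. risk is only read under has_risk, so the getD 0 default is never compared.
def calculate_crisis_level_py_alt (crisis_matches : List (String × List String)) (analysis_result : Option (List (String × Int))) : String :=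
  let levels : List String := ["low", "moderate", "high", "immediate"]
  let has_risk : Bool :=
    match analysis_result with
    | some l => !l.isEmpty && l.any (fun p => p.1 == "risk_score")
    | none => false
  let risk : Int :=
    match analysis_result with
    | some l => (((l.find? (fun p => p.1 == "risk_score")).map Prod.snd).getD 0)
    | none => 0
  let rank : Nat :=
    [ if crisis_matches.any (fun p => p.1 == "immediate") then 3 else 0,
      if has_risk && risk ≥ 90 then 3 else 0,
      if has_risk && risk ≥ 75 then 2 else 0,
      if ["violence", "physical_abuse"].any (fun c => crisis_matches.any (fun p => p.1 == c)) then 2 else 0,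
      if ["stalking", "control"].any (fun c => crisis_matches.any (fun p => p.1 == c)) then 1 else 0,
      if has_risk && risk ≥ 40 then 1 else 0 ].foldl max 0
  levels.getD rank "low"

-- ===== PRECONDITION & SPEC =====
def Spec_calculate_crisis_level_py (crisis_matches : List (String × List String)) (analysis_result : Option (List (String × Int))) (out : String) : Prop := out = calculate_crisis_level_py_alt crisis_matches analysis_result
instance (crisis_matches : List (String × List String)) (analysis_result : Option (List (String × Int))) (out : String) : Decidable (Spec_calculate_crisis_level_py crisis_matches analysis_result out) := by unfold Spec_calculate_crisis_level_py; infer_instance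

-- ===== CLAIM (what is proved, stated in full; the proofs are below) =====
def Claim_equal_calculate_crisis_level_py : Prop := ∀ (crisis_matches : List (String × List String)) (analysis_result : Option (List (String × Int))), Dom_calculate_crisis_level_py crisis_matches analysis_result → Spec_calculate_crisis_level_py crisis_matches analysis_result (calculate_crisis_level_py crisis_matches analysis_result)

-- ===== LEMMAS AND PROOFS =====

-- ===== VERDICT (by name: the statement is the Claim_ definition above) =====
theorem calculate_crisis_level_py_spec : Claim_equal_calculate_crisis_level_py := by
  intro cm ar _
  unfold Spec_calculate_crisis_level_py calculate_crisis_level_py calculate_crisis_level_py_alt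
  cases hb1 : cm.any (fun p => p.1 == "immediate") <;>
  cases hb2 : ["violence", "physical_abuse"].any (fun c => cm.any (fun p => p.1 == c)) <;>
  cases hb3 : ["stalking", "control"].any (fun c => cm.any (fun p => p.1 == c)) <;>
  cases ar with
  | none => rfl
  | some l =>
    by_cases hEmp : l.isEmpty = true
    · rw [List.isEmpty_iff] at hEmp
      subst hEmp
      simp [hb1, hb2, hb3]
    · rcases hf : l.find? (fun p => p.1 == "risk_score") with _ | p
      · have hany : l.any (fun p => p.1 == "risk_score") = false := by
          rw [List.any_eq_false]
          intro x hx
          have h := List.find?_eq_none.mp hf x hx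
          simpa using h
        simp [hb1, hb2, hb3, hf, hany, hEmp]
      · have hpp := List.find?_some (p := fun q : String × Int => q.1 == "risk_score") hf
        have hany : l.any (fun p => p.1 == "risk_score") = true :=
          List.any_eq_true.mpr ⟨p, List.mem_of_find?_eq_some hf, hpp⟩
        simp only [Bool.not_eq_true'] at hEmp
        simp [hb1, hb2, hb3, hf, hany, hEmp]
        split_ifs <;> first | rfl | omega | simp_all
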